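-- pv_equiv track=rewrite | github.com/dhunganapramod9/commerce-lens | commercelens/core/urls.py | _collapse_adjacent_duplicate_segments
-- ===== SOURCE A (Python) =====
-- def _collapse_adjacent_duplicate_segments(path: str) -> str:
--     parts = path.split("/")
--     collapsed: list[str] = []
--     for part in parts:
--         if part and collapsed and collapsed[-1] == part:
--             continue
--         collapsed.append(part)
--     return "/".join(collapsed) or "/"
-- ===== SOURCE B (Python) =====
-- def _collapse_adjacent_duplicate_segments(path: str) -> str:
--     parts = path.split("/")
--     result: list[str] = []
--     i = 0
--     n = len(parts)
--     while i < n: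
--         j = i + 1
--         while j < n and parts[j] == parts[i]:
--             j += 1
--         if parts[i]:
--             result.append(parts[i])
--         else:
--             result.extend(parts[i:j])
--         i = j
--     return "/".join(result) or "/"
-- ===== Notes on version B (the rewrite author's own statement) =====
-- stated objective: alternative
-- what changed: B scans maximal runs of equal segments with a two-pointer loop (a hand-rolled groupby) and emits each non-empty run once and each empty run verbatim, instead of A's element-by-element comparison with the last kept segment.
import Mathlib
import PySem

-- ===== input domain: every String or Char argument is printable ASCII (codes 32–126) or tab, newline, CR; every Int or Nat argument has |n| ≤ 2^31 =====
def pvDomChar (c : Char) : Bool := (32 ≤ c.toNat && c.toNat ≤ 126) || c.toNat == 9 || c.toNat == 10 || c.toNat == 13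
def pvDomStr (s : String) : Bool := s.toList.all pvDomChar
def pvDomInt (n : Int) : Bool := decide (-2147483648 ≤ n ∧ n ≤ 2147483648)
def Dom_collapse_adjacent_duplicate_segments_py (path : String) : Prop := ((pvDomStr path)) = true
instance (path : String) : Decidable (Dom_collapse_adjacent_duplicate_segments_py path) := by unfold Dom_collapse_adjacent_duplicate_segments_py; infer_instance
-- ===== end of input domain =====

-- B replaces A's compare-to-last-kept loop by a run-based (hand-rolled groupby) scan; objective: alternative structure, same cost.

-- ===== PORT A =====
-- the loop body: skip `part` when it is non-empty and equals the last kept segment, else append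
def pvStepA (acc : List String) (part : String) : List String :=
  if part ≠ "" ∧ acc ≠ [] ∧ PySem.List.pyGet? acc (-1) = some part then acc else acc ++ [part]

def collapse_adjacent_duplicate_segments_py (path : String) : String :=
  let parts := (PySem.Str.split? path "/").getD []   -- sep "/" ≠ "": split? is always `some` here
  let collapsed := parts.foldl pvStepA []
  let s := PySem.Str.join "/" collapsed
  if s = "" then "/" else s

-- ===== PORT B =====
-- run-based scan: for each maximal run of equal segments, emit its key once if non-empty, else the whole run
def pvRuns : List String → List String
  | [] => []
  | x :: xs =>
    (if x = "" then x :: xs.takeWhile (· == x) else [x]) ++ pvRuns (xs.dropWhile (· == x))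
termination_by l => l.length
decreasing_by simp only [List.length_cons]; exact Nat.lt_succ_of_le (List.length_dropWhile_le _ _)

def collapse_adjacent_duplicate_segments_py_alt (path : String) : String :=
  let parts := (PySem.Str.split? path "/").getD []
  let s := PySem.Str.join "/" (pvRuns parts)
  if s = "" then "/" else s

-- ===== PRECONDITION & SPEC =====
def Spec_collapse_adjacent_duplicate_segments_py (path : String) (out : String) : Prop := out = collapse_adjacent_duplicate_segments_py_alt path
instance (path : String) (out : String) : Decidable (Spec_collapse_adjacent_duplicate_segments_py path out) := by unfold Spec_collapse_adjacent_duplicate_segments_py; infer_instance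

-- ===== CLAIM (what is proved, stated in full; the proofs are below) =====
def Claim_equal_collapse_adjacent_duplicate_segments_py : Prop := ∀ (path : String), Dom_collapse_adjacent_duplicate_segments_py path → Spec_collapse_adjacent_duplicate_segments_py path (collapse_adjacent_duplicate_segments_py path)

-- ===== LEMMAS AND PROOFS =====

-- skipping a run: once the last kept segment is the non-empty x, A's loop drops every leading copy of x
lemma pvFoldA_dropWhile (xs : List String) (acc : List String) (x : String)
    (hx : x ≠ "") (hl : PySem.List.pyGet? acc (-1) = some x) :
    xs.foldl pvStepA acc = (xs.dropWhile (· == x)).foldl pvStepA acc := by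
  induction xs with
  | nil => rfl
  | cons y ys ih =>
    by_cases hyx : y = x
    · subst hyx
      have hacc : acc ≠ [] := by
        intro h; subst h; simp [PySem.List.pyGet?] at hl
      have : pvStepA acc y = acc := by
        simp [pvStepA, hx, hacc, hl]
      simp [List.foldl_cons, this, List.dropWhile, ih]
    · have hb : (y == x) = false := by simpa using hyx
      simp [List.dropWhile, hb]

-- absorbing a run of empty segments into pvRuns
lemma pvRuns_empty_run (xs : List String) :
    pvRuns ("" :: xs) = "" :: pvRuns xs := by
  rw [pvRuns]
  simp only []
  cases xs with
  | nil => rfl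
  | cons y ys =>
    by_cases hy : y = ""
    · subst hy
      rw [pvRuns]
      simp [List.takeWhile, List.dropWhile]
    · have hb : (y == "") = false := by simp [hy]
      simp [List.takeWhile, List.dropWhile, hb]

-- main invariant: whenever the head of the remaining input is empty or differs from the last kept
-- segment, A's loop appends exactly the run-collapsed remainder
lemma pvFoldA_eq_runs (n : ℕ) : ∀ (xs : List String), xs.length ≤ n → ∀ (acc : List String),
    (∀ x, xs.head? = some x → x = "" ∨ PySem.List.pyGet? acc (-1) ≠ some x) →
    xs.foldl pvStepA acc = acc ++ pvRuns xs := by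
  induction n with
  | zero =>
    intro xs hlen acc _
    have : xs = [] := List.length_eq_zero_iff.mp (Nat.le_zero.mp hlen)
    subst this; simp [pvRuns]
  | succ n ih =>
    intro xs hlen acc hhead
    cases xs with
    | nil => simp [pvRuns]
    | cons x ys =>
      have hstep : pvStepA acc x = acc ++ [x] := by
        rcases hhead x rfl with h | h
        · simp [pvStepA, h]
        · simp [pvStepA, h]
      by_cases hx : x = ""
      · subst hx
        have hcond : ∀ z, ys.head? = some z → z = "" ∨ PySem.List.pyGet? (acc ++ [""]) (-1) ≠ some z := by
          intro z hz
          by_cases hz0 : z = ""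
          · exact Or.inl hz0
          · refine Or.inr ?_
            rw [PySem.List.pyGet?_neg_one_append_singleton acc ""]
            intro h
            exact hz0 (Option.some_inj.mp h).symm
        have := ih ys (by simpa using Nat.lt_succ_iff.mp (by simpa using hlen)) (acc ++ [""]) hcond
        rw [List.foldl_cons, hstep, this, pvRuns_empty_run]
        simp
      · have hlast : PySem.List.pyGet? (acc ++ [x]) (-1) = some x :=
          PySem.List.pyGet?_neg_one_append_singleton acc x
        have hdrop := pvFoldA_dropWhile ys (acc ++ [x]) x hx hlast
        have hcond : ∀ z, (ys.dropWhile (· == x)).head? = some z →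
            z = "" ∨ PySem.List.pyGet? (acc ++ [x]) (-1) ≠ some z := by
          intro z hz
          have hne : (z == x) = false := by
            have h := List.head?_dropWhile_not (· == x) ys
            rwa [hz] at h
          refine Or.inr ?_
          rw [hlast]
          intro h
          rw [(Option.some_inj.mp h).symm] at hne
          simp at hne
        have hlen' : (ys.dropWhile (· == x)).length ≤ n := by
          have h1 := List.length_dropWhile_le (· == x) ys
          have h2 : ys.length ≤ n := Nat.lt_succ_iff.mp (by simpa using hlen)
          omega
        have := ih (ys.dropWhile (· == x)) hlen' (acc ++ [x]) hcond
        rw [List.foldl_cons, hstep, hdrop, this]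
        rw [pvRuns]
        simp [hx]

-- the two kept-segment lists coincide
lemma pvCollapsed_eq (parts : List String) :
    parts.foldl pvStepA [] = pvRuns parts := by
  have := pvFoldA_eq_runs parts.length parts le_rfl []
    (by intro x _; right; simp [PySem.List.pyGet?])
  simpa using this

-- ===== VERDICT (by name: the statement is the Claim_ definition above) =====
theorem collapse_adjacent_duplicate_segments_py_spec : Claim_equal_collapse_adjacent_duplicate_segments_py := by
  intro path _
  unfold Spec_collapse_adjacent_duplicate_segments_py
  simp only [collapse_adjacent_duplicate_segments_py, collapse_adjacent_duplicate_segments_py_alt,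
    pvCollapsed_eq]
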